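-- pv_equiv track=rewrite | github.com/strongbugman/apiman | apiman/bottle.py | _covert_path_rule
-- ===== SOURCE A (Python) =====
-- def _covert_path_rule(path: str) -> str:
--     # covert flask variable rules, eg "/path/<id:int>" to "/path/{id}"
--     _subs = []
--     for _sub in path.split("/"):
--         if _sub.startswith("<") and _sub.endswith(">"):
--             _subs.append(f"{{{_sub[1:-1].split(':')[0]}}}")
--         else:
--             _subs.append(_sub)
--
--     return "/".join(_subs)
-- ===== SOURCE B (Python) =====
-- def _flush(seg):
--     if seg and seg[0] == "<" and seg[-1] == ">":
--         name = []
--         for c in seg[1:-1]: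
--             if c == ":":
--                 break
--             name.append(c)
--         return ["{"] + name + ["}"]
--     return seg
--
--
-- def _covert_path_rule(path: str) -> str:
--     out = []
--     seg = []
--     for ch in path:
--         if ch == "/":
--             out += _flush(seg)
--             out.append("/")
--             seg = []
--         else:
--             seg.append(ch)
--     out += _flush(seg)
--     return "".join(out)
-- ===== Notes on version B (the rewrite author's own statement) =====
-- stated objective: alternative
-- what changed: A splits the path into a list of segments on the slash separator, transforms each and joins them back; B makes a single left-to-right pass over the characters, carrying the output and the current segment and flushing (with the bracket-to-brace conversion) a segment at each separator and at the end.
import Mathlib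
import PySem

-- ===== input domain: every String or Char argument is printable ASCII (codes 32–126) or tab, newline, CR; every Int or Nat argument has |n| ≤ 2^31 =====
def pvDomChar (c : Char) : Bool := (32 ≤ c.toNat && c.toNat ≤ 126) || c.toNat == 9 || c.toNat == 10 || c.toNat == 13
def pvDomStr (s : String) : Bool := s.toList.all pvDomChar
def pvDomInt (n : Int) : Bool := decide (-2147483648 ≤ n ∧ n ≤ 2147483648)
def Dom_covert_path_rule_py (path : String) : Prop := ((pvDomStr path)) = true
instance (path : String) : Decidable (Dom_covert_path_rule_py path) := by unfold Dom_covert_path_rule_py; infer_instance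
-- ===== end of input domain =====

-- B replaces A's split-into-a-list / transform / join pipeline by a single left-to-right pass
-- over the characters with a current-segment accumulator (objective: alternative, same cost).

-- ===== PORT A =====
-- the body of A's loop: one segment of path.split("/"), transformed
def pvASeg (sub : List Char) : List Char :=
  if PySem.Chars.startswith sub ['<'] && PySem.Chars.endswith sub ['>'] then
    '{' :: (((PySem.Chars.splitOn (PySem.Chars.slice sub (some 1) (some (-1))) [':']).headD []) ++ ['}'])
  else sub

def covert_path_rule_py (path : String) : String :=
  String.mk (PySem.Chars.join ['/'] ((PySem.Chars.splitOn path.toList ['/']).map pvASeg))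

-- ===== PORT B =====
-- Source B's _flush: bracket-segment transform (break-at-':' loop = takeWhile)
def pvFlush (seg : List Char) : List Char :=
  if !seg.isEmpty && seg.head? == some '<' && seg.getLast? == some '>' then
    '{' :: (((seg.drop 1).dropLast.takeWhile (fun c => c != ':')) ++ ['}'])
  else seg

-- Source B's single pass over the characters, carrying the output and the current segment
def pvAltLoop (out seg : List Char) : List Char → List Char
  | [] => out ++ pvFlush seg
  | c :: rest =>
      if c == '/' then pvAltLoop (out ++ pvFlush seg ++ ['/']) [] rest
      else pvAltLoop out (seg ++ [c]) rest

def covert_path_rule_py_alt (path : String) : String :=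
  String.mk (pvAltLoop [] [] path.toList)

-- ===== PRECONDITION & SPEC =====
def Spec_covert_path_rule_py (path : String) (out : String) : Prop := out = covert_path_rule_py_alt path
instance (path : String) (out : String) : Decidable (Spec_covert_path_rule_py path out) := by unfold Spec_covert_path_rule_py; infer_instance

-- ===== CLAIM (what is proved, stated in full; the proofs are below) =====
def Claim_equal_covert_path_rule_py : Prop := ∀ (path : String), Dom_covert_path_rule_py path → Spec_covert_path_rule_py path (covert_path_rule_py path)

-- ===== LEMMAS AND PROOFS =====

-- reference single-character splitter, used only in the proofs
def pvSplitC (sep : Char) : List Char → List (List Char)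
  | [] => [[]]
  | c :: rest =>
      if c = sep then [] :: pvSplitC sep rest
      else (pvSplitC sep rest).modifyHead (c :: ·)

theorem pvSplitC_ne_nil (sep : Char) (l : List Char) : pvSplitC sep l ≠ [] := by
  induction l with
  | nil => simp [pvSplitC]
  | cons c rest ih =>
    simp only [pvSplitC]
    split_ifs
    · simp
    · cases h : pvSplitC sep rest with
      | nil => exact absurd h ih
      | cons p ps => simp

theorem pvIsPrefixOf_single (c : Char) (s : List Char) :
    [c].isPrefixOf s = (s.head? == some c) := by
  cases s <;> simp [List.isPrefixOf, eq_comm]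

theorem pvIsSuffixOf_single (c : Char) (s : List Char) :
    [c].isSuffixOf s = (s.getLast? == some c) := by
  rw [List.isSuffixOf, List.getLast?_eq_head?_reverse]
  cases s.reverse <;> simp [List.isPrefixOf, eq_comm]

theorem pvGo_spec (sep : Char) :
    ∀ (fuel : Nat) (l cur : List Char) (acc : List (List Char)), l.length < fuel →
      PySem.Chars.splitOn.go [sep] fuel l cur acc
        = acc.reverse ++ (pvSplitC sep l).modifyHead (cur.reverse ++ ·) := by
  intro fuel
  induction fuel with
  | zero => intro l cur acc h; omega
  | succ n ih =>
    intro l cur acc h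
    cases l with
    | nil =>
      simp [PySem.Chars.splitOn.go, pvSplitC]
    | cons c rest =>
      rw [PySem.Chars.splitOn.go]
      by_cases hc : c = sep
      · subst hc
        have hp : [c].isPrefixOf (c :: rest) = true := by
          simp [List.isPrefixOf]
        simp only [hp, if_pos]
        have hd : List.drop ([c].length) (c :: rest) = rest := by simp
        rw [hd, ih rest [] ((cur.reverse) :: acc) (by simpa using Nat.lt_of_succ_lt_succ h)]
        simp only [pvSplitC, List.modifyHead, List.reverse_cons,
          List.append_assoc, List.singleton_append]
        cases pvSplitC c rest <;> simp
      · have hp : [sep].isPrefixOf (c :: rest) = false := by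
          simp [List.isPrefixOf]
          exact fun hh => absurd hh.symm hc
        simp only [hp, Bool.false_eq_true, if_false]
        rw [ih rest (c :: cur) acc (by simpa using Nat.lt_of_succ_lt_succ h)]
        simp only [pvSplitC, if_neg hc]
        cases hs : pvSplitC sep rest with
        | nil => exact absurd hs (pvSplitC_ne_nil sep rest)
        | cons p ps => simp [List.modifyHead]

theorem pvSplitOn_single (sep : Char) (l : List Char) :
    PySem.Chars.splitOn l [sep] = pvSplitC sep l := by
  rw [PySem.Chars.splitOn, pvGo_spec sep (l.length + 1) l [] [] (Nat.lt_succ_self _)]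
  cases hs : pvSplitC sep l with
  | nil => exact absurd hs (pvSplitC_ne_nil sep l)
  | cons p ps => simp [List.modifyHead]

theorem pvHead_splitC (sep : Char) (l : List Char) :
    (pvSplitC sep l).headD [] = l.takeWhile (fun c => c != sep) := by
  induction l with
  | nil => simp [pvSplitC]
  | cons c rest ih =>
    by_cases hc : c = sep
    · subst hc; simp [pvSplitC]
    · cases hs : pvSplitC sep rest with
      | nil => exact absurd hs (pvSplitC_ne_nil sep rest)
      | cons p ps =>
        have hp : p = rest.takeWhile (fun x => x != sep) := by
          have h2 := ih; rw [hs] at h2; simpa using h2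
        simp [pvSplitC, hs, List.modifyHead, hc, hp]

theorem pvSlice_one_negone (s : List Char) :
    PySem.List.slice s (some 1) (some (-1)) = (s.drop 1).dropLast := by
  cases s with
  | nil => simp [PySem.List.slice, PySem.List.clampIdx]
  | cons c rest =>
    simp only [PySem.List.slice, PySem.List.clampIdx]
    norm_num
    rw [List.dropLast_eq_take]
    congr 1

theorem pvFlush_eq_aSeg (seg : List Char) : pvFlush seg = pvASeg seg := by
  cases seg with
  | nil => simp [pvFlush, pvASeg, PySem.Chars.startswith, List.isPrefixOf]
  | cons c rest =>
    simp only [pvFlush, pvASeg, PySem.Chars.startswith, PySem.Chars.endswith,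
      pvIsPrefixOf_single, pvIsSuffixOf_single, List.isEmpty_cons, Bool.not_false,
      Bool.true_and]
    rw [PySem.Chars.slice_eq_listSlice, pvSlice_one_negone, pvSplitOn_single, pvHead_splitC]

theorem pvAltLoop_spec :
    ∀ (cs out seg : List Char),
      pvAltLoop out seg cs
        = out ++ PySem.Chars.join ['/'] (((pvSplitC '/' cs).modifyHead (seg ++ ·)).map pvASeg) := by
  intro cs
  induction cs with
  | nil =>
    intro out seg
    simp [pvAltLoop, pvSplitC, List.modifyHead, PySem.Chars.join_singleton, pvFlush_eq_aSeg]
  | cons c rest ih =>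
    intro out seg
    by_cases hc : c = '/'
    · subst hc
      simp only [pvAltLoop, beq_self_eq_true, if_pos]
      rw [ih]
      have h0 : pvSplitC '/' ('/' :: rest) = [] :: pvSplitC '/' rest := by simp [pvSplitC]
      rw [h0]
      cases hs : pvSplitC '/' rest with
      | nil => exact absurd hs (pvSplitC_ne_nil '/' rest)
      | cons p ps =>
        simp only [List.modifyHead, List.map_cons, List.nil_append, List.append_nil,
          pvFlush_eq_aSeg]
        conv_rhs => rw [PySem.Chars.join_cons_cons]
        simp [List.append_assoc]
    · have hb : (c == '/') = false := by simp [hc]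
      simp only [pvAltLoop, hb, Bool.false_eq_true, if_false]
      rw [ih]
      simp only [pvSplitC, if_neg hc]
      cases hs : pvSplitC '/' rest with
      | nil => exact absurd hs (pvSplitC_ne_nil '/' rest)
      | cons p ps => simp [List.modifyHead, List.append_assoc]

-- ===== VERDICT (by name: the statement is the Claim_ definition above) =====
theorem covert_path_rule_py_spec : Claim_equal_covert_path_rule_py := by
  intro path _
  unfold Spec_covert_path_rule_py covert_path_rule_py covert_path_rule_py_alt
  rw [pvAltLoop_spec, pvSplitOn_single]
  cases hs : pvSplitC '/' path.toList with
  | nil => exact absurd hs (pvSplitC_ne_nil '/' path.toList)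
  | cons p ps => simp [List.modifyHead]
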